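-- pv_equiv track=rewrite | github.com/Tautik05/Buddy | extra/objrecog/perception.py | get_object_category
-- ===== SOURCE A (Python) =====
-- def get_object_category(obj_name):
--     """Categorize objects for better understanding"""
--     categories = {
--         'food': ['apple', 'banana', 'orange', 'sandwich', 'pizza', 'cake', 'donut', 'hot dog'],
--         'drink': ['bottle', 'cup', 'wine glass'],
--         'tech': ['laptop', 'cell phone', 'tv', 'keyboard', 'mouse', 'remote'],
--         'furniture': ['chair', 'couch', 'bed', 'dining table'],
--         'kitchen': ['microwave', 'oven', 'toaster', 'sink', 'refrigerator'],
--         'personal': ['backpack', 'handbag', 'umbrella', 'tie', 'suitcase'],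
--         'sports': ['frisbee', 'sports ball', 'tennis racket', 'baseball bat']
--     }
--
--     for category, items in categories.items():
--         if obj_name in items:
--             return category
--     return 'object'
-- ===== SOURCE B (Python) =====
-- # Flat lookup table: (object name, category) pairs, kept sorted by name so the
-- # function can binary-search it. Same category data as the original table.
-- _PAIRS = [
--     ('apple', 'food'), ('backpack', 'personal'), ('banana', 'food'),
--     ('baseball bat', 'sports'), ('bed', 'furniture'), ('bottle', 'drink'),
--     ('cake', 'food'), ('cell phone', 'tech'), ('chair', 'furniture'),
--     ('couch', 'furniture'), ('cup', 'drink'), ('dining table', 'furniture'),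
--     ('donut', 'food'), ('frisbee', 'sports'), ('handbag', 'personal'),
--     ('hot dog', 'food'), ('keyboard', 'tech'), ('laptop', 'tech'),
--     ('microwave', 'kitchen'), ('mouse', 'tech'), ('orange', 'food'),
--     ('oven', 'kitchen'), ('pizza', 'food'), ('refrigerator', 'kitchen'),
--     ('remote', 'tech'), ('sandwich', 'food'), ('sink', 'kitchen'),
--     ('sports ball', 'sports'), ('suitcase', 'personal'), ('tennis racket', 'sports'),
--     ('tie', 'personal'), ('toaster', 'kitchen'), ('tv', 'tech'),
--     ('umbrella', 'personal'), ('wine glass', 'drink')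
-- ]
--
--
-- def get_object_category(obj_name):
--     """Categorize objects for better understanding"""
--     lo, hi = 0, len(_PAIRS)
--     while lo < hi:
--         mid = (lo + hi) // 2
--         name, cat = _PAIRS[mid]
--         if name == obj_name:
--             return cat
--         if name < obj_name:
--             lo = mid + 1
--         else:
--             hi = mid
--     return 'object'
-- ===== Notes on version B (the rewrite author's own statement) =====
-- stated objective: alternative
-- what changed: B keeps the same category data as one flat (name, category) table sorted by name and answers each call with a hand-written binary search over it, instead of A's per-call construction of the category dict and linear membership scan of every category's item list.
import Mathlib
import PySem

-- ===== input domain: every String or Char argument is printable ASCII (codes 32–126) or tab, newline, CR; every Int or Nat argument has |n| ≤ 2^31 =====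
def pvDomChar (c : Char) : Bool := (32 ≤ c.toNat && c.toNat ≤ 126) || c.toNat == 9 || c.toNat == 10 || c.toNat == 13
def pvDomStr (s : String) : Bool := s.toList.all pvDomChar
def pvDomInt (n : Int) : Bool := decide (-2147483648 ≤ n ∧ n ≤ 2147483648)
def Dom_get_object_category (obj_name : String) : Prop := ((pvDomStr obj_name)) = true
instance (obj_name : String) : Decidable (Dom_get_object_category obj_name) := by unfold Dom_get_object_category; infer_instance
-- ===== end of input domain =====

-- B flattens the table into (name, category) pairs sorted by name once, then answers each
-- call by hand-written binary search instead of A's per-category membership scan; objective: alternative.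

-- ===== PORT A =====
-- A's dict of categories, in insertion order.
def pvCategoriesA : List (String × List String) :=
  [("food", ["apple", "banana", "orange", "sandwich", "pizza", "cake", "donut", "hot dog"]),
   ("drink", ["bottle", "cup", "wine glass"]),
   ("tech", ["laptop", "cell phone", "tv", "keyboard", "mouse", "remote"]),
   ("furniture", ["chair", "couch", "bed", "dining table"]),
   ("kitchen", ["microwave", "oven", "toaster", "sink", "refrigerator"]),
   ("personal", ["backpack", "handbag", "umbrella", "tie", "suitcase"]),
   ("sports", ["frisbee", "sports ball", "tennis racket", "baseball bat"])]

-- A's loop: first category whose item list contains obj_name, else 'object'.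
def pvScanA (obj_name : String) : List (String × List String) → String
  | [] => "object"
  | (category, items) :: rest =>
      if items.contains obj_name then category else pvScanA obj_name rest

def get_object_category (obj_name : String) : String :=
  pvScanA obj_name pvCategoriesA

-- ===== PORT B =====
-- Source B's _PAIRS: the flat (name, category) table, kept sorted by name.
def pvPairsB : List (String × String) :=
  [("apple", "food"), ("backpack", "personal"), ("banana", "food"), ("baseball bat", "sports"), ("bed", "furniture"), ("bottle", "drink"), ("cake", "food"), ("cell phone", "tech"), ("chair", "furniture"), ("couch", "furniture"), ("cup", "drink"), ("dining table", "furniture"), ("donut", "food"), ("frisbee", "sports"), ("handbag", "personal"), ("hot dog", "food"), ("keyboard", "tech"), ("laptop", "tech"), ("microwave", "kitchen"), ("mouse", "tech"), ("orange", "food"), ("oven", "kitchen"), ("pizza", "food"), ("refrigerator", "kitchen"), ("remote", "tech"), ("sandwich", "food"), ("sink", "kitchen"), ("sports ball", "sports"), ("suitcase", "personal"), ("tennis racket", "sports"), ("tie", "personal"), ("toaster", "kitchen"), ("tv", "tech"), ("umbrella", "personal"), ("wine glass", "drink")]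

-- Source B's while-loop binary search over _PAIRS (lo, hi : half-open interval). The loop is
-- ported with a fuel counter (structural recursion); fuel := pvPairsB.length ≥ hi - lo, which
-- strictly decreases each iteration, so the fuel-exhaustion branch is unreachable.
def pvBinsB (obj_name : String) : Nat → Nat → Nat → String
  | 0, _, _ => "object"   -- unreachable: fuel ≥ hi - lo at every call
  | fuel + 1, lo, hi =>
    if lo < hi then
      -- (lo+hi)//2 on non-negative ints: Nat '/' coincides with Python's '//'
      let mid := (lo + hi) / 2
      match pvPairsB[mid]? with
      | some (name, cat) =>
          if name == obj_name then cat
          -- Python str '<' is code-point lexicographic '<' on toList (PYSEM)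
          else if name.toList < obj_name.toList then pvBinsB obj_name fuel (mid + 1) hi
          else pvBinsB obj_name fuel lo mid
      | none => "object"   -- unreachable: mid < hi ≤ pvPairsB.length at every call
    else "object"

def get_object_category_alt (obj_name : String) : String :=
  pvBinsB obj_name pvPairsB.length 0 pvPairsB.length

-- ===== PRECONDITION & SPEC =====
def Spec_get_object_category (obj_name : String) (out : String) : Prop := out = get_object_category_alt obj_name
instance (obj_name : String) (out : String) : Decidable (Spec_get_object_category obj_name out) := by unfold Spec_get_object_category; infer_instance

-- ===== CLAIM (what is proved, stated in full; the proofs are below) =====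
def Claim_equal_get_object_category : Prop := ∀ (obj_name : String), Dom_get_object_category obj_name → Spec_get_object_category obj_name (get_object_category obj_name)

-- ===== LEMMAS AND PROOFS =====

-- Binary search over a table containing no pair named obj_name returns the default.
theorem pvBinsB_not_mem (obj_name : String)
    (h : obj_name ∉ pvPairsB.map Prod.fst) :
    ∀ fuel lo hi, pvBinsB obj_name fuel lo hi = "object" := by
  intro fuel
  induction fuel with
  | zero => intro lo hi; rfl
  | succ f ih =>
    intro lo hi
    by_cases hlh : lo < hi
    · cases hget : pvPairsB[(lo + hi) / 2]? with
      | none => simp [pvBinsB, hlh, hget]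
      | some p =>
        obtain ⟨name, cat⟩ := p
        by_cases he : name = obj_name
        · exfalso
          apply h
          have hmem : (name, cat) ∈ pvPairsB := List.mem_of_getElem? hget
          subst he
          exact List.mem_map_of_mem hmem
        · simp only [pvBinsB, if_pos hlh, hget, beq_iff_eq, he, if_false]
          split <;> exact ih _ _
    · simp [pvBinsB, hlh]

-- ===== VERDICT (by name: the statement is the Claim_ definition above) =====
set_option maxRecDepth 8192 in
set_option maxHeartbeats 2000000 in
theorem get_object_category_spec : Claim_equal_get_object_category := by
  intro obj_name _
  unfold Spec_get_object_category
  by_cases h0 : obj_name = "apple"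
  · subst h0; decide
  by_cases h1 : obj_name = "banana"
  · subst h1; decide
  by_cases h2 : obj_name = "orange"
  · subst h2; decide
  by_cases h3 : obj_name = "sandwich"
  · subst h3; decide
  by_cases h4 : obj_name = "pizza"
  · subst h4; decide
  by_cases h5 : obj_name = "cake"
  · subst h5; decide
  by_cases h6 : obj_name = "donut"
  · subst h6; decide
  by_cases h7 : obj_name = "hot dog"
  · subst h7; decide
  by_cases h8 : obj_name = "bottle"
  · subst h8; decide
  by_cases h9 : obj_name = "cup"
  · subst h9; decide
  by_cases h10 : obj_name = "wine glass"
  · subst h10; decide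
  by_cases h11 : obj_name = "laptop"
  · subst h11; decide
  by_cases h12 : obj_name = "cell phone"
  · subst h12; decide
  by_cases h13 : obj_name = "tv"
  · subst h13; decide
  by_cases h14 : obj_name = "keyboard"
  · subst h14; decide
  by_cases h15 : obj_name = "mouse"
  · subst h15; decide
  by_cases h16 : obj_name = "remote"
  · subst h16; decide
  by_cases h17 : obj_name = "chair"
  · subst h17; decide
  by_cases h18 : obj_name = "couch"
  · subst h18; decide
  by_cases h19 : obj_name = "bed"
  · subst h19; decide
  by_cases h20 : obj_name = "dining table"
  · subst h20; decide
  by_cases h21 : obj_name = "microwave"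
  · subst h21; decide
  by_cases h22 : obj_name = "oven"
  · subst h22; decide
  by_cases h23 : obj_name = "toaster"
  · subst h23; decide
  by_cases h24 : obj_name = "sink"
  · subst h24; decide
  by_cases h25 : obj_name = "refrigerator"
  · subst h25; decide
  by_cases h26 : obj_name = "backpack"
  · subst h26; decide
  by_cases h27 : obj_name = "handbag"
  · subst h27; decide
  by_cases h28 : obj_name = "umbrella"
  · subst h28; decide
  by_cases h29 : obj_name = "tie"
  · subst h29; decide
  by_cases h30 : obj_name = "suitcase"
  · subst h30; decide
  by_cases h31 : obj_name = "frisbee"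
  · subst h31; decide
  by_cases h32 : obj_name = "sports ball"
  · subst h32; decide
  by_cases h33 : obj_name = "tennis racket"
  · subst h33; decide
  by_cases h34 : obj_name = "baseball bat"
  · subst h34; decide
  -- obj_name is none of the 35 table names: both sides return "object".
  have hd : pvPairsB = [("apple", "food"), ("backpack", "personal"), ("banana", "food"), ("baseball bat", "sports"), ("bed", "furniture"), ("bottle", "drink"), ("cake", "food"), ("cell phone", "tech"), ("chair", "furniture"), ("couch", "furniture"), ("cup", "drink"), ("dining table", "furniture"), ("donut", "food"), ("frisbee", "sports"), ("handbag", "personal"), ("hot dog", "food"), ("keyboard", "tech"), ("laptop", "tech"), ("microwave", "kitchen"), ("mouse", "tech"), ("orange", "food"), ("oven", "kitchen"), ("pizza", "food"), ("refrigerator", "kitchen"), ("remote", "tech"), ("sandwich", "food"), ("sink", "kitchen"), ("sports ball", "sports"), ("suitcase", "personal"), ("tennis racket", "sports"), ("tie", "personal"), ("toaster", "kitchen"), ("tv", "tech"), ("umbrella", "personal"), ("wine glass", "drink")] := rfl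
  have hnm : obj_name ∉ pvPairsB.map Prod.fst := by
    rw [hd]
    simp [h0, h1, h2, h3, h4, h5, h6, h7, h8, h9, h10, h11, h12, h13, h14, h15, h16, h17, h18, h19, h20, h21, h22, h23, h24, h25, h26, h27, h28, h29, h30, h31, h32, h33, h34]
  rw [get_object_category_alt, pvBinsB_not_mem obj_name hnm]
  have a0 : (obj_name == "apple") = false := by simpa using h0
  have a1 : (obj_name == "banana") = false := by simpa using h1
  have a2 : (obj_name == "orange") = false := by simpa using h2
  have a3 : (obj_name == "sandwich") = false := by simpa using h3
  have a4 : (obj_name == "pizza") = false := by simpa using h4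
  have a5 : (obj_name == "cake") = false := by simpa using h5
  have a6 : (obj_name == "donut") = false := by simpa using h6
  have a7 : (obj_name == "hot dog") = false := by simpa using h7
  have a8 : (obj_name == "bottle") = false := by simpa using h8
  have a9 : (obj_name == "cup") = false := by simpa using h9
  have a10 : (obj_name == "wine glass") = false := by simpa using h10
  have a11 : (obj_name == "laptop") = false := by simpa using h11
  have a12 : (obj_name == "cell phone") = false := by simpa using h12
  have a13 : (obj_name == "tv") = false := by simpa using h13
  have a14 : (obj_name == "keyboard") = false := by simpa using h14
  have a15 : (obj_name == "mouse") = false := by simpa using h15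
  have a16 : (obj_name == "remote") = false := by simpa using h16
  have a17 : (obj_name == "chair") = false := by simpa using h17
  have a18 : (obj_name == "couch") = false := by simpa using h18
  have a19 : (obj_name == "bed") = false := by simpa using h19
  have a20 : (obj_name == "dining table") = false := by simpa using h20
  have a21 : (obj_name == "microwave") = false := by simpa using h21
  have a22 : (obj_name == "oven") = false := by simpa using h22
  have a23 : (obj_name == "toaster") = false := by simpa using h23
  have a24 : (obj_name == "sink") = false := by simpa using h24
  have a25 : (obj_name == "refrigerator") = false := by simpa using h25
  have a26 : (obj_name == "backpack") = false := by simpa using h26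
  have a27 : (obj_name == "handbag") = false := by simpa using h27
  have a28 : (obj_name == "umbrella") = false := by simpa using h28
  have a29 : (obj_name == "tie") = false := by simpa using h29
  have a30 : (obj_name == "suitcase") = false := by simpa using h30
  have a31 : (obj_name == "frisbee") = false := by simpa using h31
  have a32 : (obj_name == "sports ball") = false := by simpa using h32
  have a33 : (obj_name == "tennis racket") = false := by simpa using h33
  have a34 : (obj_name == "baseball bat") = false := by simpa using h34
  simp only [get_object_category, pvScanA, pvCategoriesA, List.contains_cons, List.contains_nil,
    a0, a1, a2, a3, a4, a5, a6, a7, a8, a9, a10, a11, a12, a13, a14, a15, a16, a17, a18, a19, a20, a21, a22, a23, a24, a25, a26, a27, a28, a29, a30, a31, a32, a33, a34, Bool.or_false, Bool.false_eq_true, if_false]
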